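-- pv_equiv track=rewrite | github.com/dogezlv/SecurityLab_2024B | LabSimetric/main.py | prepare_message
-- ===== SOURCE A (Python) =====
-- def prepare_message(message):
--     message = message.upper().replace("J", "I").replace(" ", "")
--     prepared = ""
--     i = 0
--     while i < len(message):
--         prepared += message[i]
--         if i + 1 < len(message) and message[i] == message[i + 1]:
--             prepared += 'X'
--         elif i + 1 < len(message):
--             prepared += message[i + 1]
--             i += 1
--         i += 1
--     if len(prepared) % 2 != 0:
--         prepared += 'X'
--     return prepared
-- ===== SOURCE B (Python) =====
-- def prepare_message(message):
--     message = message.upper().replace("J", "I").replace(" ", "")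
--     out = []
--     pending = None
--     for c in message:
--         if pending is None:
--             pending = c
--         elif c == pending:
--             out.append(pending)
--             out.append('X')
--             pending = c
--         else:
--             out.append(pending)
--             out.append(c)
--             pending = None
--     if pending is not None:
--         out.append(pending)
--     if len(out) % 2 != 0:
--         out.append('X')
--     return ''.join(out)
-- ===== Notes on version B (the rewrite author's own statement) =====
-- stated objective: faster
-- what changed: Replaces A's index-jumping while loop with repeated string concatenation by a single forward for-loop keeping the first letter of the current digram in a state variable and building the output as a list joined once.
import Mathlib
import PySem

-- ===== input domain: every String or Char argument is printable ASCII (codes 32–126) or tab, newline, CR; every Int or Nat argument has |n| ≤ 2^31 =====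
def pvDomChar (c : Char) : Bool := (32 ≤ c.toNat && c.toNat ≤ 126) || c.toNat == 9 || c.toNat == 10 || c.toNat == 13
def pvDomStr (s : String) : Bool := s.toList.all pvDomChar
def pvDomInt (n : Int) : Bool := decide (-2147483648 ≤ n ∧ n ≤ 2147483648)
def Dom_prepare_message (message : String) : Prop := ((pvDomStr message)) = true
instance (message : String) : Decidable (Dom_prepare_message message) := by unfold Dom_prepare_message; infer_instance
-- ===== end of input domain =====

-- B replaces A's index-jumping while loop (with quadratic string +=) by a single
-- forward pass keeping a 'pending' first letter of the current digram; return values agree.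

-- ===== PORT A =====
-- while i < len(message): prepared += message[i]; double -> +'X', i+=1; else pair -> i+=2; tail -> i+=1
def pmLoopA : List Char → List Char
  | [] => []
  | [c] => [c]
  | c :: d :: rest2 =>
    if c == d then c :: 'X' :: pmLoopA (d :: rest2)
    else c :: d :: pmLoopA rest2

def prepare_message (message : String) : String :=
  let m := (PySem.Str.replace (PySem.Str.replace (PySem.Str.upper message) "J" "I") " " "").toList
  let prepared := pmLoopA m
  let prepared := if prepared.length % 2 ≠ 0 then prepared ++ ['X'] else prepared
  String.ofList prepared

-- ===== PORT B =====
def pmStepB (st : List Char × Option Char) (c : Char) : List Char × Option Char :=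
  match st.2 with
  | none => (st.1, some c)
  | some p => if c == p then (st.1 ++ [p, 'X'], some c) else (st.1 ++ [p, c], none)

def prepare_message_alt (message : String) : String :=
  let m := (PySem.Str.replace (PySem.Str.replace (PySem.Str.upper message) "J" "I") " " "").toList
  let st := m.foldl pmStepB ([], none)
  let out := st.1 ++ (match st.2 with | none => [] | some p => [p])
  let out := if out.length % 2 ≠ 0 then out ++ ['X'] else out
  String.ofList out

-- ===== PRECONDITION & SPEC =====
def Spec_prepare_message (message : String) (out : String) : Prop := out = prepare_message_alt message
instance (message : String) (out : String) : Decidable (Spec_prepare_message message out) := by unfold Spec_prepare_message; infer_instance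

-- ===== CLAIM (what is proved, stated in full; the proofs are below) =====
def Claim_equal_prepare_message : Prop := ∀ (message : String), Dom_prepare_message message → Spec_prepare_message message (prepare_message message)

-- ===== LEMMAS AND PROOFS =====

theorem pmFold_some (cs acc : List Char) (p : Char) :
    (cs.foldl pmStepB (acc, some p)).1
      ++ (match (cs.foldl pmStepB (acc, some p)).2 with | none => [] | some q => [q])
    = acc ++ pmLoopA (p :: cs) := by
  match cs with
  | [] => simp [pmLoopA]
  | c :: cs' =>
    rw [List.foldl_cons]
    by_cases h : c = p
    · subst h
      have hs : pmStepB (acc, some c) c = (acc ++ [c, 'X'], some c) := by simp [pmStepB]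
      rw [hs, pmFold_some cs' (acc ++ [c, 'X']) c]
      simp [pmLoopA]
    · have hs : pmStepB (acc, some p) c = (acc ++ [p, c], none) := by simp [pmStepB, h]
      rw [hs]
      have hpc : (p == c) = false := beq_eq_false_iff_ne.mpr (Ne.symm h)
      match cs' with
      | [] => simp [pmLoopA, hpc]
      | c' :: cs'' =>
        rw [List.foldl_cons]
        have h2 : pmStepB (acc ++ [p, c], none) c' = (acc ++ [p, c], some c') := by
          simp [pmStepB]
        rw [h2, pmFold_some cs'' (acc ++ [p, c]) c']
        simp [pmLoopA, hpc]
termination_by cs.length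

theorem pmFold_eq (cs : List Char) :
    (cs.foldl pmStepB (([] : List Char), (none : Option Char))).1
      ++ (match (cs.foldl pmStepB (([] : List Char), (none : Option Char))).2 with | none => [] | some q => [q])
    = pmLoopA cs := by
  match cs with
  | [] => simp [pmLoopA]
  | c :: cs' =>
    rw [List.foldl_cons]
    have hs : pmStepB (([] : List Char), none) c = ([], some c) := by simp [pmStepB]
    rw [hs]
    simpa using pmFold_some cs' [] c

-- ===== VERDICT (by name: the statement is the Claim_ definition above) =====
theorem prepare_message_spec : Claim_equal_prepare_message := by
  intro message _
  unfold Spec_prepare_message prepare_message prepare_message_alt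
  simp only [pmFold_eq]
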